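-- pv_equiv track=rewrite | github.com/boringbyte/leetcode | leetcode/Meta/2025/30 Days/Medium.py | the_maze
-- ===== SOURCE A (Python) =====
-- from collections import OrderedDict, defaultdict, deque, Counter
--
-- def the_maze(maze, start, destination):
--     # https://leetcode.com/problems/the-maze
--     # https://leetcode.ca/all/490.html
--     # https://leetcode.ca/2017-04-03-490-The-Maze/
--     m, n = len(maze), len(maze[0])
--     rs, cs = start
--     visited = {(rs, cs)}
--     queue = deque([start])
--     directions = [(1, 0), (-1, 0), (0, 1), (0, -1)]
--
--     while queue:
--         x, y = queue.popleft()
--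
--         for dx, dy in directions:
--             nx, ny = x, y
--
--             # Roll until ball hits wall
--             while 0 <= nx + dx < m and 0 <= ny + dy < n and maze[nx + dx][ny + dy] == 0:
--                 nx += dx
--                 ny += dy
--
--             if [nx, ny] == destination:
--                 return True
--
--             if (nx, ny) not in visited:
--                 visited.add((nx, ny))
--                 queue.append((nx, ny))
--
--     return False
-- ===== SOURCE B (Python) =====
-- def the_maze(maze, start, destination):
--     # Recursive depth-first search over the ball's stop positions: a helper
--     # dfs(x, y) rolls in each direction until a wall/boundary, succeeds when a
--     # roll ends on the destination, and otherwise recurses on unseen stops.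
--     m, n = len(maze), len(maze[0])
--     visited = {tuple(start)}
--
--     def dfs(x, y):
--         for dx, dy in ((1, 0), (-1, 0), (0, 1), (0, -1)):
--             nx, ny = x, y
--             while 0 <= nx + dx < m and 0 <= ny + dy < n and maze[nx + dx][ny + dy] == 0:
--                 nx += dx
--                 ny += dy
--             if [nx, ny] == destination:
--                 return True
--             if (nx, ny) not in visited:
--                 visited.add((nx, ny))
--                 if dfs(nx, ny):
--                     return True
--         return False
--
--     rs, cs = start
--     return dfs(rs, cs)
-- ===== Notes on version B (the rewrite author's own statement) =====
-- stated objective: alternative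
-- what changed: A's iterative BFS with an explicit FIFO deque is replaced by a recursive depth-first search: a nested dfs(x, y) helper rolls in each direction, succeeds when a roll lands on the destination, and recurses on unseen stop positions via the call stack instead of a queue; Pre_ excludes inputs where A raises (empty maze, start not of length 2, ragged mazes whose rows are shorter than row 0, on which indexing can raise).
-- outside the precondition, e.g. on the_maze([[1, 1], [1]], [0, 0], [1, 1]): A returns False, B returns False
import Mathlib
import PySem

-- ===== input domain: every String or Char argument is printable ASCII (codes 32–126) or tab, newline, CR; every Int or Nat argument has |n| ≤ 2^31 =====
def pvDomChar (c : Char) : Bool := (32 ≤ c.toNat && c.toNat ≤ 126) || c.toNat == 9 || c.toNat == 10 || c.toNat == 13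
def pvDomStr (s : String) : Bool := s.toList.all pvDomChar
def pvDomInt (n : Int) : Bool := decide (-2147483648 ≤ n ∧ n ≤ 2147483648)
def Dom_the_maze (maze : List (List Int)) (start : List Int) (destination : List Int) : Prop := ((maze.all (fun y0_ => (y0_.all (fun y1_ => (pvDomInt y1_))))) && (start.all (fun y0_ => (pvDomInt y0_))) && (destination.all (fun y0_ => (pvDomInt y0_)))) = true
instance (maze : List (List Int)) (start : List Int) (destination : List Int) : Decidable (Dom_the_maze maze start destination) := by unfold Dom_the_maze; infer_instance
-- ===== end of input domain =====

-- B replaces A's iterative BFS with an explicit FIFO deque by a recursive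
-- depth-first search (call-stack recursion over unseen stop positions);
-- objective: alternative decomposition, same asymptotic cost.

-- ===== PORT A =====
-- the four rolling directions
def pvDirsA : List (Int × Int) := [(1, 0), (-1, 0), (0, 1), (0, -1)]

-- fuel that strictly dominates the number of single-cell moves one roll can make
-- (a roll stays inside [0,m)×[0,n) after its first move, moving monotonically on one axis)
def pvRollFuel (maze : List (List Int)) : Nat := maze.length + (maze.headD []).length + 2

-- the inner `while` of A: roll from (x, y) in direction (dx, dy) until wall/boundary
def pvRollA (maze : List (List Int)) (m n dx dy : Int) : Nat → Int → Int → Int × Int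
  | 0, x, y => (x, y)
  | f + 1, x, y =>
      if (0 ≤ x + dx ∧ x + dx < m ∧ 0 ≤ y + dy ∧ y + dy < n) ∧
          ((PySem.List.pyGet? maze (x + dx)).bind
            (fun row => PySem.List.pyGet? row (y + dy)) = some 0) then
        pvRollA maze m n dx dy f (x + dx) (y + dy)
      else (x, y)

-- A's `for dx, dy in directions` body: `none` = destination found (early return True)
def pvScanA (maze : List (List Int)) (m n : Int) (dest : List Int) (x y : Int) :
    List (Int × Int) → PySem.Set (Int × Int) → List (Int × Int) →
    Option (PySem.Set (Int × Int) × List (Int × Int))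
  | [], v, q => some (v, q)
  | d :: ds, v, q =>
      let p := pvRollA maze m n d.1 d.2 (pvRollFuel maze) x y
      if [p.1, p.2] = dest then none
      else if PySem.Set.contains v p then pvScanA maze m n dest x y ds v q
      else pvScanA maze m n dest x y ds (PySem.Set.add v p) (q ++ [p])

-- A's `while queue` loop (fuel-guarded; the fuel passed by `the_maze` provably suffices)
def pvBfsA (maze : List (List Int)) (m n : Int) (dest : List Int) :
    Nat → PySem.Set (Int × Int) → List (Int × Int) → Bool
  | 0, _, _ => false
  | f + 1, v, q =>
      match q with
      | [] => false
      | (x, y) :: qs =>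
          match pvScanA maze m n dest x y pvDirsA v qs with
          | none => true
          | some (v', q') => pvBfsA maze m n dest f v' q'

def the_maze (maze : List (List Int)) (start : List Int) (destination : List Int) : Bool :=
  -- `rs, cs = start` raises unless start has exactly two items (excluded by Pre_);
  -- `maze[0]` raises on an empty maze (excluded by Pre_)
  match start with
  | [rs, cs] =>
      -- visited = {(rs,cs)}, queue = deque([start]) (the list start behaves as the pair (rs,cs))
      pvBfsA maze (maze.length : Int) ((maze.headD []).length : Int) destination
        (maze.length * (maze.headD []).length + 2) [(rs, cs)] [(rs, cs)]
  | _ => false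

-- ===== PORT B =====
-- B's tuple of directions
def pvDirsB : List (Int × Int) := [(1, 0), (-1, 0), (0, 1), (0, -1)]

-- fuel bound for B's roll, same bound as A's
def pvRollFuelB (maze : List (List Int)) : Nat := maze.length + (maze.headD []).length + 2

-- B's inner `while` loop: roll from (x, y) in direction (dx, dy) until wall/boundary
def pvRollB (maze : List (List Int)) (m n dx dy : Int) (f : Nat) (x y : Int) : Int × Int :=
  if f = 0 then (x, y)
  else if (0 ≤ x + dx ∧ x + dx < m ∧ 0 ≤ y + dy ∧ y + dy < n) ∧
      ((PySem.List.pyGet? maze (x + dx)).bind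
        (fun row => PySem.List.pyGet? row (y + dy)) = some 0) then
    pvRollB maze m n dx dy (f - 1) (x + dx) (y + dy)
  else (x, y)
termination_by f
decreasing_by omega

-- B's recursive `dfs(x, y)`: the `for dx, dy in (...)` loop is the recursion over ds;
-- `visited` is threaded through; the recursion-depth fuel `f` (guarded at the
-- recursive call) provably suffices for the fuel `the_maze_alt` passes
def pvDfsB (maze : List (List Int)) (m n : Int) (dest : List Int) :
    Nat → Int → Int → List (Int × Int) → PySem.Set (Int × Int) → Bool × PySem.Set (Int × Int)
  | _, _, _, [], v => (false, v)
  | f, x, y, d :: ds, v =>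
      let p := pvRollB maze m n d.1 d.2 (pvRollFuelB maze) x y
      if [p.1, p.2] = dest then (true, v)
      else if PySem.Set.contains v p then pvDfsB maze m n dest f x y ds v
      else
        match f with
        | 0 => (false, v)
        | f' + 1 =>
          match pvDfsB maze m n dest f' p.1 p.2 pvDirsB (PySem.Set.add v p) with
          | (true, v') => (true, v')
          | (false, v') => pvDfsB maze m n dest (f' + 1) x y ds v'
termination_by f _ _ ds _ => (f, ds.length)
decreasing_by all_goals simp_wf <;> omega

def the_maze_alt (maze : List (List Int)) (start : List Int) (destination : List Int) : Bool :=
  -- `rs, cs = start` raises unless start has exactly two items (excluded by Pre_);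
  -- `maze[0]` raises on an empty maze (excluded by Pre_)
  if start.length = 2 then
    -- visited = {tuple(start)}; return dfs(rs, cs)
    let rs := start.getD 0 0
    let cs := start.getD 1 0
    (pvDfsB maze (maze.length : Int) ((maze.headD []).length : Int) destination
      (maze.length * (maze.headD []).length + 2) rs cs pvDirsB [(rs, cs)]).1
  else false

-- ===== PRECONDITION & SPEC =====
-- Pre_ excludes inputs where A raises: empty maze (maze[0] → IndexError), start not of
-- length 2 (unpacking → ValueError), and mazes with a row shorter than row 0 (indexing a
-- rolled-into missing cell → IndexError in general); the last clause also excludes some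
-- ragged mazes on which A happens to return because the ball never reads a missing cell.
def Pre_the_maze (maze : List (List Int)) (start : List Int) (destination : List Int) : Prop :=
  maze ≠ [] ∧ start.length = 2 ∧ ∀ row ∈ maze, (maze.headD []).length ≤ row.length
instance (maze : List (List Int)) (start : List Int) (destination : List Int) : Decidable (Pre_the_maze maze start destination) := by unfold Pre_the_maze; infer_instance

def pvWitness_the_maze : List (List Int) × List Int × List Int :=
  ([[0, 0], [1, 0]], [0, 0], [1, 1])

def Spec_the_maze (maze : List (List Int)) (start : List Int) (destination : List Int) (out : Bool) : Prop := out = the_maze_alt maze start destination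
instance (maze : List (List Int)) (start : List Int) (destination : List Int) (out : Bool) : Decidable (Spec_the_maze maze start destination out) := by unfold Spec_the_maze; infer_instance

-- ===== CLAIM (what is proved, stated in full; the proofs are below) =====
def Claim_equal_the_maze : Prop := ∀ (maze : List (List Int)) (start : List Int) (destination : List Int), Dom_the_maze maze start destination → Pre_the_maze maze start destination → Spec_the_maze maze start destination (the_maze maze start destination)

-- ===== LEMMAS AND PROOFS =====

-- abstract view shared by both correctness arguments
def pvR (maze : List (List Int)) (m n : Int) (p d : Int × Int) : Int × Int :=
  pvRollA maze m n d.1 d.2 (pvRollFuel maze) p.1 p.2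

def pvStep (maze : List (List Int)) (m n : Int) (p q : Int × Int) : Prop :=
  ∃ d ∈ pvDirsA, pvR maze m n p d = q

def pvHit (maze : List (List Int)) (m n : Int) (dest : List Int) (p : Int × Int) : Prop :=
  ∃ d ∈ pvDirsA, [(pvR maze m n p d).1, (pvR maze m n p d).2] = dest

def pvRv (maze : List (List Int)) (m n : Int) (v : List (Int × Int)) (p : Int × Int) : Prop :=
  ∃ s ∈ v, Relation.ReflTransGen (pvStep maze m n) s p

-- the finite superset every visited list stays inside: the start plus the grid
def pvSL (m n : Int) (s0 : Int × Int) : List (Int × Int) :=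
  s0 :: ((List.range m.toNat).flatMap fun (i : Nat) => (List.range n.toNat).map fun (j : Nat) => ((i : Int), (j : Int)))

theorem pvContains_iff (s : PySem.Set (Int × Int)) (x : Int × Int) :
    PySem.Set.contains s x = true ↔ x ∈ s := by
  constructor
  · intro h; exact List.mem_of_elem_eq_true (by simpa using h)
  · intro h; simpa using List.elem_eq_true_of_mem h

theorem pvRollFuelB_eq : pvRollFuelB = pvRollFuel := rfl

theorem pvRollB_eq (maze : List (List Int)) (m n dx dy : Int) :
    ∀ (f : Nat) (x y : Int), pvRollB maze m n dx dy f x y = pvRollA maze m n dx dy f x y := by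
  intro f
  induction f with
  | zero => intro x y; rw [pvRollB]; simp [pvRollA]
  | succ f ih =>
      intro x y
      rw [pvRollB]
      simp only [Nat.succ_ne_zero, if_false, Nat.add_sub_cancel, pvRollA]
      split_ifs with h
      · exact ih _ _
      · rfl

theorem pvRollA_cases (maze : List (List Int)) (m n dx dy : Int) :
    ∀ (f : Nat) (x y : Int), pvRollA maze m n dx dy f x y = (x, y) ∨
      (0 ≤ (pvRollA maze m n dx dy f x y).1 ∧ (pvRollA maze m n dx dy f x y).1 < m ∧
       0 ≤ (pvRollA maze m n dx dy f x y).2 ∧ (pvRollA maze m n dx dy f x y).2 < n) := by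
  intro f
  induction f with
  | zero => intro x y; left; rfl
  | succ f ih =>
      intro x y
      simp only [pvRollA]
      split_ifs with h
      · rcases ih (x + dx) (y + dy) with h' | h'
        · right; rw [h']; exact ⟨h.1.1, h.1.2.1, h.1.2.2.1, h.1.2.2.2⟩
        · right; exact h'
      · left; rfl

theorem pvMem_SL (m n : Int) (s0 q : Int × Int)
    (h : 0 ≤ q.1 ∧ q.1 < m ∧ 0 ≤ q.2 ∧ q.2 < n) : q ∈ pvSL m n s0 := by
  have h1 : ((q.1.toNat : Int), (q.2.toNat : Int)) = q := by
    obtain ⟨a, b⟩ := q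
    simp only [Prod.mk.injEq]
    exact ⟨Int.toNat_of_nonneg h.1, Int.toNat_of_nonneg h.2.2.1⟩
  have hq1 : q.1.toNat ∈ List.range m.toNat := List.mem_range.mpr (by omega)
  have hq2 : q.2.toNat ∈ List.range n.toNat := List.mem_range.mpr (by omega)
  exact List.mem_cons_of_mem _ ((List.mem_flatMap (l := List.range m.toNat)
    (f := fun (i : Nat) => (List.range n.toNat).map fun (j : Nat) => ((i : Int), (j : Int)))).mpr
    ⟨q.1.toNat, hq1, List.mem_map.mpr ⟨q.2.toNat, hq2, h1⟩⟩)

theorem pvR_mem_S (maze : List (List Int)) (m n : Int) (s0 : Int × Int) (p d : Int × Int)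
    (hp : p ∈ pvSL m n s0) : pvR maze m n p d ∈ pvSL m n s0 := by
  rcases pvRollA_cases maze m n d.1 d.2 (pvRollFuel maze) p.1 p.2 with h | h
  · unfold pvR; rw [h]; simpa using hp
  · exact pvMem_SL m n s0 _ h

theorem pvClosure_mem (maze : List (List Int)) (m n : Int) (v : List (Int × Int))
    (hcl : ∀ p ∈ v, ∀ q, pvStep maze m n p q → q ∈ v) :
    ∀ s p, s ∈ v → Relation.ReflTransGen (pvStep maze m n) s p → p ∈ v := by
  intro s p hs h
  induction h with
  | refl => exact hs
  | tail _ hstep ih => exact hcl _ ih _ hstep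

theorem pvLen_le_card (v w : List (Int × Int))
    (hv : v.Nodup) (hsub : ∀ p ∈ v, p ∈ w) : v.length ≤ w.length := by
  have h1 : v.toFinset.card = v.length := List.toFinset_card_of_nodup hv
  have h2 : v.toFinset.card ≤ w.toFinset.card :=
    Finset.card_le_card (fun x hx => List.mem_toFinset.mpr (hsub x (List.mem_toFinset.mp hx)))
  have h3 : w.toFinset.card ≤ w.length := w.toFinset_card_le
  omega

-- a Nodup sublist of w at least as long as w already contains every element of w
theorem pvFull (v w : List (Int × Int)) (hv : v.Nodup) (hsub : ∀ p ∈ v, p ∈ w)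
    (hlen : w.length ≤ v.length) : ∀ q ∈ w, q ∈ v := by
  have h1 : v.toFinset.card = v.length := List.toFinset_card_of_nodup hv
  have h2 : v.toFinset ⊆ w.toFinset :=
    fun x hx => List.mem_toFinset.mpr (hsub x (List.mem_toFinset.mp hx))
  have h3 : w.toFinset.card ≤ w.length := w.toFinset_card_le
  have h4 : v.toFinset = w.toFinset := Finset.eq_of_subset_of_card_le h2 (by omega)
  intro q hq
  exact List.mem_toFinset.mp (h4 ▸ List.mem_toFinset.mpr hq)

theorem pvSL_length (m n : Int) (s0 : Int × Int) :
    (pvSL m n s0).length = m.toNat * n.toNat + 1 := by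
  simp [pvSL, List.length_flatMap]

-- ---- A side: characterisation of pvScanA ----

theorem pvScanA_none_iff (maze : List (List Int)) (m n : Int) (dest : List Int) (x y : Int) :
    ∀ (ds : List (Int × Int)) (v q : List (Int × Int)),
      pvScanA maze m n dest x y ds v q = none ↔
        ∃ d ∈ ds, [(pvR maze m n (x, y) d).1, (pvR maze m n (x, y) d).2] = dest := by
  intro ds
  induction ds with
  | nil => intro v q; simp [pvScanA]
  | cons d ds ih =>
      intro v q
      simp only [pvScanA, pvR]
      split_ifs with h1 h2
      · exact iff_of_true rfl ⟨d, List.mem_cons_self, by simpa only [pvR] using h1⟩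
      · rw [ih]
        constructor
        · rintro ⟨e, he, hee⟩; exact ⟨e, List.mem_cons_of_mem _ he, hee⟩
        · rintro ⟨e, he, hee⟩
          rcases List.mem_cons.mp he with rfl | he'
          · exact absurd (by simpa only [pvR] using hee) h1
          · exact ⟨e, he', hee⟩
      · rw [ih]
        constructor
        · rintro ⟨e, he, hee⟩; exact ⟨e, List.mem_cons_of_mem _ he, hee⟩
        · rintro ⟨e, he, hee⟩
          rcases List.mem_cons.mp he with rfl | he'
          · exact absurd (by simpa only [pvR] using hee) h1
          · exact ⟨e, he', hee⟩

theorem pvScanA_some (maze : List (List Int)) (m n : Int) (dest : List Int) (x y : Int) :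
    ∀ (ds : List (Int × Int)) (v q v' q' : List (Int × Int)),
      pvScanA maze m n dest x y ds v q = some (v', q') →
      ∃ l : List (Int × Int),
        v' = v ++ l ∧ q' = q ++ l ∧
        (∀ a ∈ l, a ∉ v ∧ ∃ d ∈ ds, pvR maze m n (x, y) d = a) ∧
        (∀ d ∈ ds, pvR maze m n (x, y) d ∈ v') ∧
        (v.Nodup → v'.Nodup) := by
  intro ds
  induction ds with
  | nil =>
      intro v q v' q' h
      simp only [pvScanA, Option.some.injEq, Prod.mk.injEq] at h
      exact ⟨[], by simp [← h.1], by simp [← h.2], by simp, by simp, by rw [← h.1]; exact id⟩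
  | cons d ds ih =>
      intro v q v' q' h
      simp only [pvScanA] at h
      split_ifs at h with h1 h2
      · -- p already in v
        have hmem : pvR maze m n (x, y) d ∈ v := by
          simp only [pvR]
          exact (pvContains_iff _ _).mp h2
        rcases ih v q v' q' h with ⟨l, hv', hq', hl, hds, hnd⟩
        refine ⟨l, hv', hq', ?_, ?_, hnd⟩
        · intro a ha; rcases hl a ha with ⟨hna, e, he, hee⟩
          exact ⟨hna, e, List.mem_cons_of_mem _ he, hee⟩
        · intro e he
          rcases List.mem_cons.mp he with rfl | he'
          · rw [hv']; exact List.mem_append_left _ hmem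
          · exact hds e he'
      · -- fresh: added
        have hnotmem : pvR maze m n (x, y) d ∉ v := by
          intro hc
          exact h2 ((pvContains_iff _ _).mpr (by simpa only [pvR] using hc))
        have hadd : PySem.Set.add v (pvRollA maze m n d.1 d.2 (pvRollFuel maze) x y)
            = v ++ [pvR maze m n (x, y) d] := by
          have hnm : pvRollA maze m n d.1 d.2 (pvRollFuel maze) x y ∉ v := hnotmem
          rw [PySem.Set.add_eq_ite, if_neg hnm]
          rfl
        rw [hadd] at h
        rcases ih _ _ v' q' h with ⟨l, hv', hq', hl, hds, hnd⟩
        refine ⟨pvR maze m n (x, y) d :: l, by simpa using hv', by simpa using hq', ?_, ?_, ?_⟩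
        · intro a ha
          rcases List.mem_cons.mp ha with rfl | ha'
          · exact ⟨hnotmem, d, List.mem_cons_self, rfl⟩
          · rcases hl a ha' with ⟨hna, e, he, hee⟩
            refine ⟨fun hc => hna (List.mem_append_left _ hc), e, List.mem_cons_of_mem _ he, hee⟩
        · intro e he
          rcases List.mem_cons.mp he with rfl | he'
          · rw [hv']; exact List.mem_append_left _ (List.mem_append_right _ (List.mem_singleton_self _))
          · exact hds e he'
        · intro hnodup
          refine hnd ?_
          rw [List.nodup_append]
          exact ⟨hnodup, List.nodup_singleton _, (by
            intro a ha b hb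
            rw [List.mem_singleton] at hb
            subst hb
            exact fun he => hnotmem (he ▸ ha))⟩

-- ---- A side: master lemma for the BFS loop ----

theorem pvBfsA_iff (maze : List (List Int)) (m n : Int) (dest : List Int) (s0 : Int × Int) :
    ∀ (fuel : Nat) (v q : List (Int × Int)),
      v.Nodup →
      (∀ p ∈ q, p ∈ v) →
      (∀ p ∈ v, p ∉ q → ¬ pvHit maze m n dest p ∧ ∀ q', pvStep maze m n p q' → q' ∈ v) →
      (∀ p ∈ v, p ∈ pvSL m n s0) →
      q.length + (pvSL m n s0).length ≤ fuel + v.length →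
      (pvBfsA maze m n dest fuel v q = true ↔ ∃ p, pvRv maze m n v p ∧ pvHit maze m n dest p) := by
  intro fuel
  induction fuel with
  | zero =>
      intro v q hv hqv hdone hS hfuel
      have hvlen : v.length ≤ (pvSL m n s0).length := pvLen_le_card v _ hv hS
      have hq0 : q = [] := by
        have : q.length = 0 := by omega
        exact List.length_eq_zero_iff.mp this
      subst hq0
      simp only [pvBfsA, Bool.false_eq_true, false_iff]
      rintro ⟨p, ⟨s, hs, hrtg⟩, hhit⟩
      have hcl : ∀ p ∈ v, ∀ q', pvStep maze m n p q' → q' ∈ v := by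
        intro p hp q' hstep
        exact (hdone p hp (by simp)).2 q' hstep
      have hpv : p ∈ v := pvClosure_mem maze m n v hcl s p hs hrtg
      exact (hdone p hpv (by simp)).1 hhit
  | succ fuel ih =>
      intro v q hv hqv hdone hS hfuel
      match q with
      | [] =>
          simp only [pvBfsA, Bool.false_eq_true, false_iff]
          rintro ⟨p, ⟨s, hs, hrtg⟩, hhit⟩
          have hcl : ∀ p ∈ v, ∀ q', pvStep maze m n p q' → q' ∈ v := by
            intro p hp q' hstep
            exact (hdone p hp (by simp)).2 q' hstep
          have hpv : p ∈ v := pvClosure_mem maze m n v hcl s p hs hrtg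
          exact (hdone p hpv (by simp)).1 hhit
      | (x, y) :: qs =>
          simp only [pvBfsA]
          cases hscan : pvScanA maze m n dest x y pvDirsA v qs with
          | none =>
              simp only [true_iff]
              have hhit : pvHit maze m n dest (x, y) :=
                (pvScanA_none_iff maze m n dest x y pvDirsA v qs).mp hscan
              exact ⟨(x, y), ⟨(x, y), hqv _ (by simp), Relation.ReflTransGen.refl⟩, hhit⟩
          | some vq =>
              obtain ⟨v', q'⟩ := vq
              rcases pvScanA_some maze m n dest x y pvDirsA v qs v' q' hscan with
                ⟨l, hv', hq', hl, hds, hnd⟩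
              have hnohit : ¬ pvHit maze m n dest (x, y) := by
                intro hc
                have := (pvScanA_none_iff maze m n dest x y pvDirsA v qs).mpr hc
                rw [hscan] at this; exact Option.some_ne_none _ this
              have hxyv : (x, y) ∈ v := hqv _ (by simp)
              have hstepxy : ∀ q'', pvStep maze m n (x, y) q'' → q'' ∈ v' := by
                rintro q'' ⟨d, hd, rfl⟩
                exact hds d hd
              have hsub : ∀ a ∈ v, a ∈ v' := by
                intro a ha; rw [hv']; exact List.mem_append_left _ ha
              have hhs' : ∀ p ∈ v', p ∈ pvSL m n s0 := by
                intro p hp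
                rw [hv'] at hp
                rcases List.mem_append.mp hp with hp' | hp'
                · exact hS p hp'
                · rcases (hl p hp').2 with ⟨d, _, rfl⟩
                  exact pvR_mem_S maze m n s0 (x, y) d (hS _ hxyv)
              have hiff := ih v' q'
                (hnd hv)
                (by
                  intro p hp
                  rw [hq'] at hp
                  rcases List.mem_append.mp hp with hp' | hp'
                  · exact hsub _ (hqv _ (List.mem_cons_of_mem _ hp'))
                  · rw [hv']; exact List.mem_append_right _ hp')
                (by
                  intro p hp hpq'
                  rw [hv'] at hp
                  rcases List.mem_append.mp hp with hp' | hp'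
                  · by_cases hpx : p = (x, y)
                    · subst hpx
                      refine ⟨hnohit, fun q'' hstep => hstepxy q'' hstep⟩
                    · have hpq : p ∉ (x, y) :: qs := by
                        intro hc
                        rcases List.mem_cons.mp hc with rfl | hc'
                        · exact hpx rfl
                        · exact hpq' (by rw [hq']; exact List.mem_append_left _ hc')
                      rcases hdone p hp' hpq with ⟨h1, h2⟩
                      exact ⟨h1, fun q'' hstep => hsub _ (h2 q'' hstep)⟩
                  · exact absurd (by rw [hq']; exact List.mem_append_right _ hp') hpq'
                )
                hhs'
                (by
                  have hlv : v'.length = v.length + l.length := by rw [hv']; simp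
                  have hlq : q'.length = qs.length + l.length := by rw [hq']; simp
                  simp only [List.length_cons] at hfuel
                  omega)
              rw [hiff]
              constructor
              · rintro ⟨p, ⟨s, hs, hrtg⟩, hhit⟩
                rw [hv'] at hs
                rcases List.mem_append.mp hs with hs' | hs'
                · exact ⟨p, ⟨s, hs', hrtg⟩, hhit⟩
                · rcases (hl s hs').2 with ⟨d, hd, rfl⟩
                  refine ⟨p, ⟨(x, y), hxyv, ?_⟩, hhit⟩
                  exact Relation.ReflTransGen.head ⟨d, hd, rfl⟩ hrtg
              · rintro ⟨p, ⟨s, hs, hrtg⟩, hhit⟩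
                exact ⟨p, ⟨s, hsub _ hs, hrtg⟩, hhit⟩

-- ---- B side: reduction lemmas for the DFS equations ----

theorem pvRollB_pvR (maze : List (List Int)) (m n dx dy : Int) (x y : Int) :
    pvRollB maze m n dx dy (pvRollFuelB maze) x y = pvR maze m n (x, y) (dx, dy) := by
  simp only [pvR, pvRollB_eq, pvRollFuelB_eq]

theorem pvDfsB_nil (maze : List (List Int)) (m n : Int) (dest : List Int)
    (f : Nat) (x y : Int) (v : PySem.Set (Int × Int)) :
    pvDfsB maze m n dest f x y [] v = (false, v) := by
  rw [pvDfsB.eq_def]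

theorem pvDfsB_cons_hit (maze : List (List Int)) (m n : Int) (dest : List Int)
    (f : Nat) (x y : Int) (d : Int × Int) (ds : List (Int × Int)) (v : PySem.Set (Int × Int))
    (hhit : [(pvR maze m n (x, y) d).1, (pvR maze m n (x, y) d).2] = dest) :
    pvDfsB maze m n dest f x y (d :: ds) v = (true, v) := by
  rw [pvDfsB.eq_def]
  simp only [pvRollB_pvR, Prod.mk.eta]
  simp [hhit]

theorem pvDfsB_cons_vis (maze : List (List Int)) (m n : Int) (dest : List Int)
    (f : Nat) (x y : Int) (d : Int × Int) (ds : List (Int × Int)) (v : PySem.Set (Int × Int))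
    (hnh : ¬ [(pvR maze m n (x, y) d).1, (pvR maze m n (x, y) d).2] = dest)
    (hm : pvR maze m n (x, y) d ∈ v) :
    pvDfsB maze m n dest f x y (d :: ds) v = pvDfsB maze m n dest f x y ds v := by
  rw [pvDfsB.eq_def]
  simp only [pvRollB_pvR, Prod.mk.eta]
  simp [hnh, hm]

theorem pvDfsB_cons_zero (maze : List (List Int)) (m n : Int) (dest : List Int)
    (x y : Int) (d : Int × Int) (ds : List (Int × Int)) (v : PySem.Set (Int × Int))
    (hnh : ¬ [(pvR maze m n (x, y) d).1, (pvR maze m n (x, y) d).2] = dest)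
    (hm : pvR maze m n (x, y) d ∉ v) :
    pvDfsB maze m n dest 0 x y (d :: ds) v = (false, v) := by
  rw [pvDfsB.eq_def]
  simp only [pvRollB_pvR, Prod.mk.eta]
  simp [hnh, hm]

theorem pvDfsB_cons_rec (maze : List (List Int)) (m n : Int) (dest : List Int)
    (f' : Nat) (x y : Int) (d : Int × Int) (ds : List (Int × Int)) (v : PySem.Set (Int × Int))
    (hnh : ¬ [(pvR maze m n (x, y) d).1, (pvR maze m n (x, y) d).2] = dest)
    (hm : pvR maze m n (x, y) d ∉ v) :
    pvDfsB maze m n dest (f' + 1) x y (d :: ds) v =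
      match pvDfsB maze m n dest f' (pvR maze m n (x, y) d).1 (pvR maze m n (x, y) d).2
          pvDirsB (PySem.Set.add v (pvR maze m n (x, y) d)) with
      | (true, v') => (true, v')
      | (false, v') => pvDfsB maze m n dest (f' + 1) x y ds v' := by
  have hv : ¬ (PySem.Set.contains v (pvR maze m n (x, y) d) = true) := fun hc =>
    hm (List.mem_of_elem_eq_true (by simpa using hc))
  rw [pvDfsB.eq_def]
  simp only [pvRollB_pvR, Prod.mk.eta]
  simp only [if_neg hnh, if_neg hv]

-- the two direction lists are the same list
theorem pvDirsB_eq : pvDirsB = pvDirsA := rfl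

-- ---- B side: soundness of the DFS (a `true` result exhibits a reachable hit) ----

theorem pvDfsB_true (maze : List (List Int)) (m n : Int) (dest : List Int) :
    ∀ (f : Nat) (x y : Int) (ds : List (Int × Int)) (v : PySem.Set (Int × Int)),
      (∀ d ∈ ds, d ∈ pvDirsA) →
      (pvDfsB maze m n dest f x y ds v).1 = true →
      ∃ q, Relation.ReflTransGen (pvStep maze m n) (x, y) q ∧ pvHit maze m n dest q := by
  intro f x y ds v
  induction f, x, y, ds, v using pvDfsB.induct maze m n dest with
  | case1 f x y v =>
      intro _ h
      rw [pvDfsB_nil] at h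
      exact absurd h (by simp)
  | case2 f x y d ds v p hhit =>
      have hp : p = pvR maze m n (x, y) d := pvRollB_pvR maze m n d.1 d.2 x y
      simp only [hp] at hhit
      intro hds _
      exact ⟨(x, y), Relation.ReflTransGen.refl, d, hds d List.mem_cons_self, hhit⟩
  | case3 f x y d ds v p hnh hvis ih =>
      have hp : p = pvR maze m n (x, y) d := pvRollB_pvR maze m n d.1 d.2 x y
      simp only [hp] at hnh hvis
      intro hds h
      rw [pvDfsB_cons_vis maze m n dest f x y d ds v hnh
        (List.mem_of_elem_eq_true (by simpa using hvis))] at h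
      exact ih (fun e he => hds e (List.mem_cons_of_mem _ he)) h
  | case4 x y d ds v p hnh hvis =>
      have hp : p = pvR maze m n (x, y) d := pvRollB_pvR maze m n d.1 d.2 x y
      simp only [hp] at hnh hvis
      intro _ h
      rw [pvDfsB_cons_zero maze m n dest x y d ds v hnh
        (fun hc => hvis (List.elem_eq_true_of_mem hc))] at h
      exact absurd h (by simp)
  | case5 x y d ds v p hnh hvis f' v' hrec ih =>
      have hp : p = pvR maze m n (x, y) d := pvRollB_pvR maze m n d.1 d.2 x y
      simp only [hp] at hnh hvis hrec ih
      intro hds _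
      rcases ih (fun e he => he) (by rw [hrec]) with ⟨q, hq, hhit⟩
      exact ⟨q, Relation.ReflTransGen.head ⟨d, hds d List.mem_cons_self, rfl⟩ hq, hhit⟩
  | case6 x y d ds v p hnh hvis f' v1 hrec ih1 ih2 =>
      have hp : p = pvR maze m n (x, y) d := pvRollB_pvR maze m n d.1 d.2 x y
      simp only [hp] at hnh hvis hrec
      intro hds h
      rw [pvDfsB_cons_rec maze m n dest f' x y d ds v hnh
        (fun hc => hvis (List.elem_eq_true_of_mem hc)), hrec] at h
      exact ih2 (fun e he => hds e (List.mem_cons_of_mem _ he)) h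

-- ---- B side: a `false` result fully explores every newly visited stop ----

theorem pvDfsB_false (maze : List (List Int)) (m n : Int) (dest : List Int) (s0 : Int × Int) :
    ∀ (f : Nat) (x y : Int) (ds : List (Int × Int)) (v : PySem.Set (Int × Int))
      (v' : PySem.Set (Int × Int)),
      pvDfsB maze m n dest f x y ds v = (false, v') →
      v.Nodup → (∀ a ∈ v, a ∈ pvSL m n s0) → (x, y) ∈ v →
      (pvSL m n s0).length + 1 ≤ f + 1 + v.length →
      ∃ l : List (Int × Int),
        v' = v ++ l ∧ v'.Nodup ∧ (∀ a ∈ v', a ∈ pvSL m n s0) ∧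
        (∀ d ∈ ds, ¬ [(pvR maze m n (x, y) d).1, (pvR maze m n (x, y) d).2] = dest ∧
          pvR maze m n (x, y) d ∈ v') ∧
        (∀ a ∈ l, ∀ d ∈ pvDirsA, ¬ [(pvR maze m n a d).1, (pvR maze m n a d).2] = dest ∧
          pvR maze m n a d ∈ v') := by
  intro f x y ds v
  induction f, x, y, ds, v using pvDfsB.induct maze m n dest with
  | case1 f x y v =>
      intro v' h hnd hS hxy hfuel
      rw [pvDfsB_nil] at h
      obtain ⟨-, rfl⟩ : false = false ∧ v = v' := by
        simpa [Prod.ext_iff] using h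
      exact ⟨[], by simp, hnd, hS, by simp, by simp⟩
  | case2 f x y d ds v p hhit =>
      have hp : p = pvR maze m n (x, y) d := pvRollB_pvR maze m n d.1 d.2 x y
      simp only [hp] at hhit
      intro v' h hnd hS hxy hfuel
      rw [pvDfsB_cons_hit maze m n dest f x y d ds v hhit] at h
      exact absurd h (by simp)
  | case3 f x y d ds v p hnh hvis ih =>
      have hp : p = pvR maze m n (x, y) d := pvRollB_pvR maze m n d.1 d.2 x y
      simp only [hp] at hnh hvis
      intro v' h hnd hS hxy hfuel
      have hm : pvR maze m n (x, y) d ∈ v :=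
        List.mem_of_elem_eq_true (by simpa using hvis)
      rw [pvDfsB_cons_vis maze m n dest f x y d ds v hnh hm] at h
      rcases ih v' h hnd hS hxy hfuel with ⟨l, e1, e2, e3, e4, e5⟩
      refine ⟨l, e1, e2, e3, ?_, e5⟩
      intro e he
      rcases List.mem_cons.mp he with rfl | he'
      · exact ⟨hnh, by rw [e1]; exact List.mem_append_left _ hm⟩
      · exact e4 e he'
  | case4 x y d ds v p hnh hvis =>
      have hp : p = pvR maze m n (x, y) d := pvRollB_pvR maze m n d.1 d.2 x y
      simp only [hp] at hnh hvis
      intro v' h hnd hS hxy hfuel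
      -- fuel 0 at an unvisited stop is impossible: v already contains all of pvSL
      exfalso
      have hfull : ∀ q ∈ pvSL m n s0, q ∈ v :=
        pvFull v (pvSL m n s0) hnd hS (by omega)
      have hpSL : pvR maze m n (x, y) d ∈ pvSL m n s0 :=
        pvR_mem_S maze m n s0 (x, y) d (hS _ hxy)
      exact hvis (List.elem_eq_true_of_mem (hfull _ hpSL))
  | case5 x y d ds v p hnh hvis f' v' hrec ih =>
      have hp : p = pvR maze m n (x, y) d := pvRollB_pvR maze m n d.1 d.2 x y
      simp only [hp] at hnh hvis hrec
      intro v'' h hnd hS hxy hfuel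
      rw [pvDfsB_cons_rec maze m n dest f' x y d ds v hnh
        (fun hc => hvis (List.elem_eq_true_of_mem hc)), hrec] at h
      exact absurd h (by simp)
  | case6 x y d ds v p hnh hvis f' v1 hrec ih1 ih2 =>
      have hp : p = pvR maze m n (x, y) d := pvRollB_pvR maze m n d.1 d.2 x y
      simp only [hp] at hnh hvis hrec ih1
      intro v' h hnd hS hxy hfuel
      have hpnot : pvR maze m n (x, y) d ∉ v := by
        intro hc
        exact hvis (List.elem_eq_true_of_mem hc)
      have hadd : PySem.Set.add v (pvR maze m n (x, y) d)
          = v ++ [pvR maze m n (x, y) d] := by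
        rw [PySem.Set.add_eq_ite, if_neg hpnot]
      have hrec' : pvDfsB maze m n dest f' (pvR maze m n (x, y) d).1
          (pvR maze m n (x, y) d).2 pvDirsB (v ++ [pvR maze m n (x, y) d]) = (false, v1) := by
        rw [← hadd]
        exact hrec
      have hPmem : pvR maze m n (x, y) d ∈ pvSL m n s0 :=
        pvR_mem_S maze m n s0 (x, y) d (hS _ hxy)
      have hnd1 : (v ++ [pvR maze m n (x, y) d]).Nodup := by
        rw [List.nodup_append]
        refine ⟨hnd, List.nodup_singleton _, ?_⟩
        intro a ha b hb
        rw [List.mem_singleton] at hb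
        subst hb
        exact fun he => hpnot (he ▸ ha)
      have ih1' := ih1 v1
      rw [hadd] at ih1'
      rcases ih1' hrec' hnd1
        (by
          intro a ha
          rcases List.mem_append.mp ha with ha' | ha'
          · exact hS a ha'
          · rw [List.mem_singleton] at ha'; exact ha' ▸ hPmem)
        (by simp)
        (by simp only [List.length_append, List.length_singleton]; omega)
        with ⟨l1, hv1, hnd1', hS1, E1p, E2l1⟩
      have hxy1 : (x, y) ∈ v1 := by
        rw [hv1]; exact List.mem_append_left _ (List.mem_append_left _ hxy)
      have h' : pvDfsB maze m n dest (f' + 1) x y ds v1 = (false, v') := by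
        rw [← h, pvDfsB_cons_rec maze m n dest f' x y d ds v hnh hpnot, hrec]
      have hlen1 : v.length + 1 ≤ v1.length := by
        rw [hv1]; simp
      rcases ih2 v' h' hnd1' hS1 hxy1 (by omega) with ⟨l2, hv', hnd', hS', E1ds, E2l2⟩
      have hsub1 : ∀ a ∈ v1, a ∈ v' := by
        intro a ha; rw [hv']; exact List.mem_append_left _ ha
      refine ⟨pvR maze m n (x, y) d :: (l1 ++ l2), ?_, hnd', hS', ?_, ?_⟩
      · rw [hv', hv1]; simp
      · intro e he
        rcases List.mem_cons.mp he with rfl | he'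
        · refine ⟨hnh, hsub1 _ ?_⟩
          rw [hv1]
          exact List.mem_append_left _ (List.mem_append_right _ (List.mem_singleton_self _))
        · exact E1ds e he'
      · intro a ha e hde
        rcases List.mem_cons.mp ha with rfl | ha'
        · have hp2 : ((pvR maze m n (x, y) d).1, (pvR maze m n (x, y) d).2)
              = pvR maze m n (x, y) d := rfl
          have := E1p e (by rw [pvDirsB_eq]; exact hde)
          rw [hp2] at this
          exact ⟨this.1, hsub1 _ this.2⟩
        · rcases List.mem_append.mp ha' with hl | hl
          · have := E2l1 a hl e hde
            exact ⟨this.1, hsub1 _ this.2⟩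
          · exact E2l2 a hl e hde

-- ===== VERDICT (by name: the statement is the Claim_ definition above) =====
theorem the_maze_spec : Claim_equal_the_maze := by
  intro maze start destination _ hpre
  obtain ⟨hne, hlen, hrows⟩ := hpre
  obtain ⟨rs, cs, rfl⟩ := List.length_eq_two.mp hlen
  unfold Spec_the_maze
  set m : Int := (maze.length : Int) with hm
  set n : Int := ((maze.headD []).length : Int) with hn
  set F : Nat := maze.length * (maze.headD []).length + 2 with hF
  have hSLlen : (pvSL m n (rs, cs)).length = maze.length * (maze.headD []).length + 1 := by
    have := pvSL_length m n (rs, cs)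
    have hm' : m.toNat = maze.length := by rw [hm]; exact Int.toNat_natCast _
    have hn' : n.toNat = (maze.headD []).length := by rw [hn]; exact Int.toNat_natCast _
    rw [hm', hn'] at this
    omega
  have hA := pvBfsA_iff maze m n destination (rs, cs) F [(rs, cs)] [(rs, cs)]
    (by simp)
    (by simp)
    (by intro p hp hnq; simp at hp; simp [hp] at hnq)
    (by intro p hp; simp at hp; simp [hp, pvSL])
    (by simp; omega)
  have hAdef : the_maze maze [rs, cs] destination
      = pvBfsA maze m n destination F [(rs, cs)] [(rs, cs)] := rfl
  have hBdef : the_maze_alt maze [rs, cs] destination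
      = (pvDfsB maze m n destination F rs cs pvDirsB [(rs, cs)]).1 := rfl
  have hRv : ∀ p, pvRv maze m n [(rs, cs)] p ↔
      Relation.ReflTransGen (pvStep maze m n) (rs, cs) p := by
    intro p
    constructor
    · rintro ⟨s, hs, h⟩
      rw [List.mem_singleton] at hs
      exact hs ▸ h
    · intro h
      exact ⟨(rs, cs), List.mem_singleton_self _, h⟩
  have hBiff : (pvDfsB maze m n destination F rs cs pvDirsB [(rs, cs)]).1 = true ↔
      ∃ q, Relation.ReflTransGen (pvStep maze m n) (rs, cs) q ∧
        pvHit maze m n destination q := by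
    cases hB : pvDfsB maze m n destination F rs cs pvDirsB [(rs, cs)] with
    | mk b v' =>
        cases b with
        | true =>
            simp only [true_iff]
            exact pvDfsB_true maze m n destination F rs cs pvDirsB [(rs, cs)]
              (fun d hd => by simpa [pvDirsB_eq] using hd) (by rw [hB])
        | false =>
            simp only [Bool.false_eq_true, false_iff]
            rcases pvDfsB_false maze m n destination (rs, cs) F rs cs pvDirsB [(rs, cs)] v' hB
              (by simp)
              (by intro a ha; rw [List.mem_singleton] at ha; simp [ha, pvSL])
              (List.mem_singleton_self _)
              (by simp only [List.length_singleton]; omega)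
              with ⟨l, hv', hnd', hS', E1, E2⟩
            rintro ⟨q, hq, hhit⟩
            have hexpl : ∀ a ∈ v', ¬ pvHit maze m n destination a ∧
                ∀ b, pvStep maze m n a b → b ∈ v' := by
              intro a ha
              rw [hv'] at ha
              rcases List.mem_append.mp ha with ha' | ha'
              · rw [List.mem_singleton] at ha'
                subst ha'
                constructor
                · rintro ⟨d, hd, hdd⟩
                  exact (E1 d (by simpa [pvDirsB_eq] using hd)).1 hdd
                · rintro b ⟨d, hd, rfl⟩
                  exact (E1 d (by simpa [pvDirsB_eq] using hd)).2
              · constructor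
                · rintro ⟨d, hd, hdd⟩
                  exact (E2 a ha' d hd).1 hdd
                · rintro b ⟨d, hd, rfl⟩
                  exact (E2 a ha' d hd).2
            have hstart : (rs, cs) ∈ v' := by
              rw [hv']; exact List.mem_append_left _ (List.mem_singleton_self _)
            have hqv : q ∈ v' :=
              pvClosure_mem maze m n v' (fun p hp => (hexpl p hp).2) (rs, cs) q hstart hq
            exact (hexpl q hqv).1 hhit
  rw [hAdef, hBdef, Bool.eq_iff_iff, hA, hBiff]
  constructor
  · rintro ⟨p, hp, hhit⟩
    exact ⟨p, (hRv p).mp hp, hhit⟩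
  · rintro ⟨p, hp, hhit⟩
    exact ⟨p, (hRv p).mpr hp, hhit⟩
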